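-- pv_equiv track=rewrite | github.com/venkatmiriyala19/GeeksForGeeks | Row with minimum number of 1's.py | minRow
-- ===== SOURCE A (Python) =====
-- def minRow(n,m,a):
--     one=[]
--     c=0
--     for i in range(n):
--         for j in range(m):
--             if a[i][j]==1:
--                 c+=1
--         one.append(c)
--         c=0
--     b=min(one)
--
--     return one.index(b)+1
-- ===== SOURCE B (Python) =====
-- def minRow(n, m, a):
--     best_idx = None
--     best_count = None
--     for i in range(n):
--         c = sum(1 for j in range(m) if a[i][j] == 1)
--         if best_count is None or c < best_count:
--             best_idx, best_count = i, c
--     if best_idx is None: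
--         raise ValueError("min() arg is an empty sequence")
--     return best_idx + 1
-- ===== Notes on version B (the rewrite author's own statement) =====
-- stated objective: simpler
-- what changed: Drops A's 'one' list entirely: instead of building a list of per-row 1-counts and then running min() and list.index() over it, B makes a single pass tracking the running best count and its first index (strict < keeps the earliest minimum row), raising ValueError like A's min([]) when the row range is empty.
import Mathlib
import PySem

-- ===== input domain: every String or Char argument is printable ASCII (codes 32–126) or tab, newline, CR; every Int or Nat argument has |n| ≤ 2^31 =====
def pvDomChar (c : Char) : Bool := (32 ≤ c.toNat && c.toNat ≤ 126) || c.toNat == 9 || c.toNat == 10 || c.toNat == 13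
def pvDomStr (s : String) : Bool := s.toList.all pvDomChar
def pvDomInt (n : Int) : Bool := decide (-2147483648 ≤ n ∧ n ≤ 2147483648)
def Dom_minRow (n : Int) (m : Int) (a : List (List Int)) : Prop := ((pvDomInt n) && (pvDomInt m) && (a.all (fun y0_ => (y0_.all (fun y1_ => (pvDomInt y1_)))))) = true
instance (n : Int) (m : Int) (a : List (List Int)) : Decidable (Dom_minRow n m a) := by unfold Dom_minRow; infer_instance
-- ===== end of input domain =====

-- B drops A's list of counts: one pass tracking the running first-minimum instead of
-- build-list / min() / list.index() (objective: simpler); neither version mutates its input.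

-- ===== PORT A =====
-- A-side helper: the inner 'for j in range(m): if a[i][j]==1: c+=1' loop on one row
def rowOnesA (m : Int) (row : List Int) : Int :=
  (PySem.List.pyRange 0 m 1).foldl
    (fun c j => if PySem.List.pyGetD row j 0 = 1 then c + 1 else c) 0

def minRow (n : Int) (m : Int) (a : List (List Int)) : Int :=
  let one := (PySem.List.pyRange 0 n 1).foldl
    (fun one i => one ++ [rowOnesA m (PySem.List.pyGetD a i [])]) []
  let b := (PySem.List.min? one (fun x => x)).getD 0
  (((PySem.List.index? one b).getD 0 : Nat) : Int) + 1

-- ===== PORT B =====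
-- B-side helper: sum(1 for j in range(m) if a[i][j] == 1)
def rowOnesB (m : Int) (row : List Int) : Int :=
  (PySem.List.pyRange 0 m 1).foldl
    (fun c j => c + if PySem.List.pyGetD row j 0 = 1 then 1 else 0) 0

-- B-side helper: one loop iteration updating the optional (best_idx, best_count)
def bStep (m : Int) (a : List (List Int)) (st : Option (Int × Int)) (i : Int) : Option (Int × Int) :=
  let c := rowOnesB m (PySem.List.pyGetD a i [])
  match st with
  | none => some (i, c)
  | some (bi, bc) => if c < bc then some (i, c) else some (bi, bc)

def minRow_alt (n : Int) (m : Int) (a : List (List Int)) : Int :=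
  match (PySem.List.pyRange 0 n 1).foldl (bStep m a) none with
  | none => 0  -- the Python raises ValueError here (n ≤ 0); outside Pre_minRow
  | some st => st.1 + 1

-- ===== PRECONDITION & SPEC =====
-- Pre_ is exactly where the Python A returns: n ≥ 1 (min([]) raises ValueError for n ≤ 0),
-- and, unless m ≤ 0 (when a[i][j] is never evaluated), n ≤ len(a) and every one of the
-- first n rows has at least m entries (else IndexError).
def Pre_minRow (n : Int) (m : Int) (a : List (List Int)) : Prop :=
  1 ≤ n ∧ (m ≤ 0 ∨ (n ≤ (a.length : Int) ∧ ∀ row ∈ a.take n.toNat, m ≤ (row.length : Int)))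
instance (n : Int) (m : Int) (a : List (List Int)) : Decidable (Pre_minRow n m a) := by
  unfold Pre_minRow; infer_instance

def pvWitness_minRow : Int × Int × List (List Int) := (2, 2, [[1, 1], [0, 1]])

def Spec_minRow (n : Int) (m : Int) (a : List (List Int)) (out : Int) : Prop := out = minRow_alt n m a
instance (n : Int) (m : Int) (a : List (List Int)) (out : Int) : Decidable (Spec_minRow n m a out) := by unfold Spec_minRow; infer_instance

-- ===== CLAIM (what is proved, stated in full; the proofs are below) =====
def Claim_equal_minRow : Prop := ∀ (n : Int) (m : Int) (a : List (List Int)), Dom_minRow n m a → Pre_minRow n m a → Spec_minRow n m a (minRow n m a)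

-- ===== LEMMAS AND PROOFS =====

-- first index of the minimum of a nonempty list (0 on [])
def fmIdx : List Int → Int
  | [] => 0
  | [_] => 0
  | c :: d :: t => if c ≤ List.foldl min d t then 0 else fmIdx (d :: t) + 1

-- B's running-best recursion made explicit: best index, best count, current index, remaining counts
def gP : Int → Int → Int → List Int → Int × Int
  | bi, bc, _, [] => (bi, bc)
  | bi, bc, k, c :: t => if c < bc then gP k c (k + 1) t else gP bi bc (k + 1) t

theorem foldl_min_comm (t : List Int) : ∀ (x y : Int),
    List.foldl min (min x y) t = min x (List.foldl min y t) := by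
  induction t with
  | nil => intro x y; simp
  | cons a t ih =>
    intro x y
    simp only [List.foldl_cons]
    rw [min_assoc, ih]

-- the two counting loops agree: 'if …: c += 1' vs 'c + (1 if … else 0)'
theorem foldl_count_shapes (p : Int → Prop) [DecidablePred p] :
    ∀ (l : List Int) (acc : Int),
      l.foldl (fun c j => if p j then c + 1 else c) acc
        = l.foldl (fun c j => c + if p j then 1 else 0) acc := by
  intro l
  induction l with
  | nil => intro acc; rfl
  | cons x t ih =>
    intro acc
    simp only [List.foldl_cons]
    by_cases hx : p x
    · rw [if_pos hx, if_pos hx, ih]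
    · rw [if_neg hx, if_neg hx, ih, add_zero]

theorem rowOnes_eq (m : Int) (row : List Int) : rowOnesA m row = rowOnesB m row := by
  unfold rowOnesA rowOnesB
  exact foldl_count_shapes (fun j => PySem.List.pyGetD row j 0 = 1) _ 0

-- A-side: one.index(min(one)) is the first-minimum index
theorem indexOfMin_eq_fmIdx : ∀ (t : List Int) (c : Int),
    (((PySem.List.index? (c :: t) (List.foldl min c t)).getD 0 : Nat) : Int) = fmIdx (c :: t) := by
  intro t
  induction t with
  | nil =>
    intro c
    simp [fmIdx]
  | cons d t' ih =>
    intro c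
    have hfold : List.foldl min c (d :: t') = min c (List.foldl min d t') := by
      simp only [List.foldl_cons]
      exact foldl_min_comm t' c d
    by_cases hc : c ≤ List.foldl min d t'
    · rw [hfold, min_eq_left hc, PySem.List.index?_cons_self]
      simp [fmIdx, hc]
    · have hlt : List.foldl min d t' < c := lt_of_not_ge hc
      rw [hfold, min_eq_right (le_of_lt hlt)]
      rw [PySem.List.index?_cons_of_ne _ (by omega)]
      have hsome : (PySem.List.index? (d :: t') (List.foldl min d t')).isSome := by
        rw [PySem.List.index?_isSome_iff]
        rcases PySem.List.foldl_min_mem t' d with h | h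
        · rw [h]; exact List.mem_cons_self
        · exact List.mem_cons_of_mem _ h
      obtain ⟨j, hj⟩ := Option.isSome_iff_exists.mp hsome
      have ihd := ih d
      rw [hj] at ihd ⊢
      simp only [Option.map_some, Option.getD_some] at ihd ⊢
      have hfm : fmIdx (c :: d :: t') = fmIdx (d :: t') + 1 := by
        simp [fmIdx, hc]
      rw [hfm, ← ihd]
      push_cast
      omega

-- B-side stage 1: the foldl over a consecutive range with a 'some' state is gP on the row counts
theorem foldB_gP (m : Int) (a : List (List Int)) : ∀ (N : Nat) (k b bi bc : Int), (b - k).toNat = N →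
    (PySem.List.pyRange k b 1).foldl (bStep m a) (some (bi, bc))
      = some (gP bi bc k ((PySem.List.pyRange k b 1).map
            (fun i => rowOnesB m (PySem.List.pyGetD a i [])))) := by
  intro N
  induction N with
  | zero =>
    intro k b bi bc hN
    rw [PySem.List.pyRange_one_eq_nil (by omega)]
    simp [gP]
  | succ N ih =>
    intro k b bi bc hN
    rw [PySem.List.pyRange_one_cons (by omega)]
    rw [List.map_cons, List.foldl_cons]
    have hstep : bStep m a (some (bi, bc)) k =
        if rowOnesB m (PySem.List.pyGetD a k []) < bc
        then some (k, rowOnesB m (PySem.List.pyGetD a k [])) else some (bi, bc) := rfl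
    have hgP : gP bi bc k (rowOnesB m (PySem.List.pyGetD a k [])
          :: (PySem.List.pyRange (k + 1) b 1).map (fun i => rowOnesB m (PySem.List.pyGetD a i [])))
        = if rowOnesB m (PySem.List.pyGetD a k []) < bc
          then gP k (rowOnesB m (PySem.List.pyGetD a k [])) (k + 1)
                 ((PySem.List.pyRange (k + 1) b 1).map (fun i => rowOnesB m (PySem.List.pyGetD a i [])))
          else gP bi bc (k + 1)
                 ((PySem.List.pyRange (k + 1) b 1).map (fun i => rowOnesB m (PySem.List.pyGetD a i []))) := rfl
    rw [hstep, hgP]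
    by_cases hc : rowOnesB m (PySem.List.pyGetD a k []) < bc
    · rw [if_pos hc, if_pos hc, ih (k + 1) b _ _ (by omega)]
    · rw [if_neg hc, if_neg hc, ih (k + 1) b _ _ (by omega)]

-- B-side stage 2: gP computes the first-minimum index (offset by its start index k)
theorem gP_eq_fmIdx : ∀ (t : List Int) (c bi bc k : Int),
    (gP bi bc k (c :: t)).1 = if List.foldl min c t < bc then k + fmIdx (c :: t) else bi := by
  intro t
  induction t with
  | nil =>
    intro c bi bc k
    have h : gP bi bc k [c] = if c < bc then gP k c (k + 1) [] else gP bi bc (k + 1) [] := rfl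
    rw [h]
    simp only [List.foldl_nil, fmIdx, gP]
    split_ifs <;> simp
  | cons d t' ih =>
    intro c bi bc k
    have hfold : List.foldl min c (d :: t') = min c (List.foldl min d t') := by
      simp only [List.foldl_cons]
      exact foldl_min_comm t' c d
    have h : gP bi bc k (c :: d :: t')
        = if c < bc then gP k c (k + 1) (d :: t') else gP bi bc (k + 1) (d :: t') := rfl
    rw [h, hfold]
    by_cases h1 : c < bc
    · rw [if_pos h1, ih]
      rw [if_pos (lt_of_le_of_lt (min_le_left _ _) h1)]
      by_cases h2 : List.foldl min d t' < c
      · rw [if_pos h2]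
        have hcle : ¬ c ≤ List.foldl min d t' := by omega
        simp only [fmIdx, if_neg hcle]
        ring
      · rw [if_neg h2]
        have hcle : c ≤ List.foldl min d t' := by omega
        simp only [fmIdx, if_pos hcle]
        ring
    · rw [if_neg h1, ih]
      by_cases h2 : List.foldl min d t' < bc
      · rw [if_pos h2, if_pos (lt_of_le_of_lt (min_le_right _ _) h2)]
        have hcle : ¬ c ≤ List.foldl min d t' := by omega
        simp only [fmIdx, if_neg hcle]
        ring
      · rw [if_neg h2, if_neg (by rw [min_lt_iff]; omega)]

theorem minRow_spec : Claim_equal_minRow := by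
  intro n m a _ hpre
  obtain ⟨h1, -⟩ := hpre
  unfold Spec_minRow minRow minRow_alt
  rw [PySem.List.foldl_append_singleton_eq_map, List.nil_append]
  have hcons : PySem.List.pyRange 0 n 1 = 0 :: PySem.List.pyRange 1 n 1 :=
    PySem.List.pyRange_one_cons (by omega)
  rw [hcons, List.map_cons, List.foldl_cons]
  have hb0 : bStep m a none 0
      = some ((0 : Int), rowOnesB m (PySem.List.pyGetD a 0 [])) := rfl
  rw [hb0, foldB_gP m a (n - 1).toNat 1 n 0 _ (by omega)]
  have hmapeq : (PySem.List.pyRange 1 n 1).map (fun i => rowOnesB m (PySem.List.pyGetD a i []))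
      = (PySem.List.pyRange 1 n 1).map (fun i => rowOnesA m (PySem.List.pyGetD a i [])) := by
    apply List.map_congr_left
    intro i _
    exact (rowOnes_eq m _).symm
  have hc0 : rowOnesB m (PySem.List.pyGetD a 0 []) = rowOnesA m (PySem.List.pyGetD a 0 []) :=
    (rowOnes_eq m _).symm
  rw [hmapeq, hc0]
  dsimp only
  rw [PySem.List.min?_id_cons, Option.getD_some, indexOfMin_eq_fmIdx]
  cases hres : (PySem.List.pyRange 1 n 1).map (fun i => rowOnesA m (PySem.List.pyGetD a i [])) with
  | nil =>
    simp [fmIdx, gP]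
  | cons c t =>
    rw [gP_eq_fmIdx]
    by_cases hx : List.foldl min c t < rowOnesA m (PySem.List.pyGetD a 0 [])
    · rw [if_pos hx]
      have hcle : ¬ rowOnesA m (PySem.List.pyGetD a 0 []) ≤ List.foldl min c t := by omega
      simp only [fmIdx, if_neg hcle]
      ring
    · rw [if_neg hx]
      have hcle : rowOnesA m (PySem.List.pyGetD a 0 []) ≤ List.foldl min c t := by omega
      simp only [fmIdx, if_pos hcle]
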